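-- pv_equiv track=rewrite | github.com/allezgavin/Minghong | factor_test.py | replace_duplicates_with_suffixes
-- ===== SOURCE A (Python) =====
-- def replace_duplicates_with_suffixes(lst):
--     element_count = {}
--     result = []
--
--     for element in lst:
--         if element in element_count:
--             element_count[element] += 1
--             result.append(f"{element}_{element_count[element]}")
--         else:
--             element_count[element] = 0
--             result.append(element)
--
--     return result
-- ===== SOURCE B (Python) =====
-- def replace_duplicates_with_suffixes(lst):
--     # pass 1: total occurrence counts; pass 2: walk backwards, decrementing,
--     # so each element's suffix is the number of earlier occurrences; reverse at end
--     total = {}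
--     for x in lst:
--         total[x] = total.get(x, 0) + 1
--     rev = []
--     for x in reversed(lst):
--         total[x] -= 1
--         k = total[x]
--         rev.append(x if k == 0 else f"{x}_{k}")
--     rev.reverse()
--     return rev
-- ===== Notes on version B (the rewrite author's own statement) =====
-- stated objective: alternative
-- what changed: Replaces A's single forward pass with a dict of running counts by a two-pass scheme: first build total occurrence counts, then traverse the list in reverse decrementing them so each element's suffix index is derived backwards, building the output back-to-front and reversing it at the end.
import Mathlib
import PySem

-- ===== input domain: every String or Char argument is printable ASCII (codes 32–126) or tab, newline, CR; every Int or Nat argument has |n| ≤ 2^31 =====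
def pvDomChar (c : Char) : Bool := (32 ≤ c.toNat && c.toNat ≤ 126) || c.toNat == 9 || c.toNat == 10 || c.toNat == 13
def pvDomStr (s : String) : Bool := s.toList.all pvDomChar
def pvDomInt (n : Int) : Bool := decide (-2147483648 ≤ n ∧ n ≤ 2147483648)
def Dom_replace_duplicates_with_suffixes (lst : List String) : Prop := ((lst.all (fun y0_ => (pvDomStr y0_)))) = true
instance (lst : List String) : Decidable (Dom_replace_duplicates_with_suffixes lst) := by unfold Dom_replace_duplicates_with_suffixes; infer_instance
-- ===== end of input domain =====

-- B replaces A's forward pass with a dict of running counts by two passes: total counts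
-- first, then a reverse traversal decrementing them, building the output back-to-front
-- (objective: alternative decomposition, same O(n) cost).

-- ===== PORT A =====
-- literal port of A: one left fold carrying (element_count, result)
def replace_duplicates_with_suffixes (lst : List String) : List String :=
  (lst.foldl
    (fun (st : PySem.Dict String Int × List String) element =>
      if PySem.Dict.contains st.1 element then
        let newCount := PySem.Dict.getD st.1 element 0 + 1   -- element_count[element] += 1
        (PySem.Dict.insert st.1 element newCount,
         st.2 ++ [element ++ "_" ++ PySem.Int.toStr newCount])
      else
        (PySem.Dict.insert st.1 element 0, st.2 ++ [element]))
    (PySem.Dict.empty, [])).2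

-- ===== PORT B =====
-- literal port of B: pass 1 builds total counts; pass 2 folds over reversed(lst),
-- decrementing ('total[x] -= 1' on an always-present key is Dict.modify, exact here),
-- appending to rev; final rev.reverse() is .reverse
def replace_duplicates_with_suffixes_alt (lst : List String) : List String :=
  let total := lst.foldl
    (fun d x => PySem.Dict.insert d x (PySem.Dict.getD d x 0 + 1)) PySem.Dict.empty
  let res := lst.reverse.foldl
    (fun (st : PySem.Dict String Int × List String) x =>
      let d := PySem.Dict.modify st.1 x 0 (· - 1)
      let k := PySem.Dict.getD d x 0
      (d, st.2 ++ [if k = 0 then x else x ++ "_" ++ PySem.Int.toStr k]))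
    (total, [])
  res.2.reverse

-- ===== PRECONDITION & SPEC =====
def Spec_replace_duplicates_with_suffixes (lst : List String) (out : List String) : Prop := out = replace_duplicates_with_suffixes_alt lst
instance (lst : List String) (out : List String) : Decidable (Spec_replace_duplicates_with_suffixes lst out) := by unfold Spec_replace_duplicates_with_suffixes; infer_instance

-- ===== CLAIM (what is proved, stated in full; the proofs are below) =====
def Claim_equal_replace_duplicates_with_suffixes : Prop := ∀ (lst : List String), Dom_replace_duplicates_with_suffixes lst → Spec_replace_duplicates_with_suffixes lst (replace_duplicates_with_suffixes lst)

-- ===== LEMMAS AND PROOFS =====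

-- the common specification: each element suffixed by its count in the prefix u ++ (earlier part)
def specFrom : List String → List String → List String
  | _, [] => []
  | u, a :: v =>
      (if u.count a = 0 then a else a ++ "_" ++ PySem.Int.toStr (u.count a : Int)) ::
        specFrom (u ++ [a]) v

theorem specFrom_append_singleton (w : List String) (u : List String) (a : String) :
    specFrom u (w ++ [a]) =
      specFrom u w ++
        [if (u ++ w).count a = 0 then a
         else a ++ "_" ++ PySem.Int.toStr ((u ++ w).count a : Int)] := by
  induction w generalizing u with
  | nil => simp [specFrom]
  | cons b w ih =>
    simp only [List.cons_append, specFrom, ih (u ++ [b])]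
    simp [List.append_assoc]

-- A's fold invariant: dict maps x to (count so far) - 1, result is specFrom [] of the prefix
theorem foldA_invariant (l p : List String) (d : PySem.Dict String Int)
    (hd : ∀ x, d.get? x = if p.count x = 0 then none else some ((p.count x : Int) - 1)) :
    (l.foldl
      (fun (st : PySem.Dict String Int × List String) element =>
        if PySem.Dict.contains st.1 element then
          let newCount := PySem.Dict.getD st.1 element 0 + 1
          (PySem.Dict.insert st.1 element newCount,
           st.2 ++ [element ++ "_" ++ PySem.Int.toStr newCount])
        else
          (PySem.Dict.insert st.1 element 0, st.2 ++ [element]))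
      (d, specFrom [] p)).2
    = specFrom [] (p ++ l) := by
  induction l generalizing p d with
  | nil => simp
  | cons a l ih =>
    rw [List.foldl_cons]
    have hcont : d.contains a = (if p.count a = 0 then false else true) := by
      rw [PySem.Dict.contains_eq_isSome_get?, hd a]
      split <;> simp
    have hconsapp : p ++ a :: l = (p ++ [a]) ++ l := by simp
    by_cases hz : p.count a = 0
    · -- new element
      simp only [hcont, hz, if_true]
      rw [if_neg (by simp)]
      have step : (PySem.Dict.insert d a 0, specFrom [] p ++ [a]) =
          (PySem.Dict.insert d a 0, specFrom [] (p ++ [a])) := by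
        rw [specFrom_append_singleton p [] a]
        simp [hz]
      rw [step, hconsapp]
      apply ih
      intro x
      rw [PySem.Dict.get?_insert]
      by_cases hxa : x = a
      · subst hxa
        have hc : List.count x (p ++ [x]) = List.count x p + 1 := by simp
        rw [if_pos rfl, hc, hz, if_neg (by omega)]
        norm_num
      · have hax : a ≠ x := fun h => hxa h.symm
        have hc : List.count x (p ++ [a]) = List.count x p := by
          simp [List.count_append, hax]
        rw [if_neg hxa, hc, hd x]
    · -- seen before
      simp only [hcont, hz, if_false]
      rw [if_pos (by simp)]
      have hgetD : d.getD a 0 = (p.count a : Int) - 1 := by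
        rw [PySem.Dict.getD_eq_get?_getD, hd a, if_neg hz]; rfl
      simp only [hgetD]
      have hval : (p.count a : Int) - 1 + 1 = (p.count a : Int) := by ring
      rw [hval]
      have step : specFrom [] p ++ [a ++ "_" ++ PySem.Int.toStr (p.count a : Int)] =
          specFrom [] (p ++ [a]) := by
        rw [specFrom_append_singleton p [] a]
        simp [hz]
      rw [step, hconsapp]
      apply ih
      intro x
      rw [PySem.Dict.get?_insert]
      by_cases hxa : x = a
      · subst hxa
        have hc : List.count x (p ++ [x]) = List.count x p + 1 := by simp
        rw [if_pos rfl, hc, if_neg (by omega)]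
        congr 1
        push_cast
        ring
      · have hax : a ≠ x := fun h => hxa h.symm
        have hc : List.count x (p ++ [a]) = List.count x p := by
          simp [List.count_append, hax]
        rw [if_neg hxa, hc, hd x]

theorem portA_eq_specFrom (lst : List String) :
    replace_duplicates_with_suffixes lst = specFrom [] lst := by
  unfold replace_duplicates_with_suffixes
  have h := foldA_invariant lst [] PySem.Dict.empty
    (by intro x; simp [PySem.Dict.get?_empty])
  simpa [specFrom] using h

-- B's second fold: processing the reversed remainder m, with the dict holding the counts
-- of u ++ m.reverse, produces (specFrom u m.reverse).reverse appended to out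
theorem foldB_invariant (m : List String) (u : List String) (d : PySem.Dict String Int)
    (out : List String)
    (hd : ∀ x, d.getD x 0 = ((u ++ m.reverse).count x : Int)) :
    (m.foldl
      (fun (st : PySem.Dict String Int × List String) x =>
        let d := PySem.Dict.modify st.1 x 0 (· - 1)
        let k := PySem.Dict.getD d x 0
        (d, st.2 ++ [if k = 0 then x else x ++ "_" ++ PySem.Int.toStr k]))
      (d, out)).2
    = out ++ (specFrom u m.reverse).reverse := by
  induction m generalizing d out with
  | nil => simp [specFrom]
  | cons a m ih =>
    rw [List.foldl_cons]
    have hk : (PySem.Dict.modify d a 0 (· - 1)).getD a 0 = ((u ++ m.reverse).count a : Int) := by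
      rw [PySem.Dict.getD_modify_self, hd a]
      have : (u ++ (a :: m).reverse).count a = (u ++ m.reverse).count a + 1 := by
        simp [List.reverse_cons, ← List.append_assoc]
      rw [this]
      push_cast
      ring
    have hd' : ∀ x, (PySem.Dict.modify d a 0 (· - 1)).getD x 0 =
        ((u ++ m.reverse).count x : Int) := by
      intro x
      by_cases hxa : x = a
      · subst hxa; exact hk
      · rw [PySem.Dict.getD_modify, if_neg hxa, hd x]
        have hax : a ≠ x := fun h => hxa h.symm
        have : (u ++ (a :: m).reverse).count x = (u ++ m.reverse).count x := by
          simp [List.reverse_cons, ← List.append_assoc, hax]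
        rw [this]
    simp only [hk]
    rw [ih (PySem.Dict.modify d a 0 (· - 1)) _ hd']
    rw [List.reverse_cons, specFrom_append_singleton]
    simp
    have hcond : ((List.count a u : Int) + (List.count a m : Int) = 0) ↔
        (List.count a u = 0 ∧ List.count a m = 0) := by omega
    simp only [hcond]

theorem portB_eq_specFrom (lst : List String) :
    replace_duplicates_with_suffixes_alt lst = specFrom [] lst := by
  show ((lst.reverse.foldl
      (fun (st : PySem.Dict String Int × List String) x =>
        let d := PySem.Dict.modify st.1 x 0 (· - 1)
        let k := PySem.Dict.getD d x 0
        (d, st.2 ++ [if k = 0 then x else x ++ "_" ++ PySem.Int.toStr k]))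
      (lst.foldl (fun d x => PySem.Dict.insert d x (PySem.Dict.getD d x 0 + 1))
        PySem.Dict.empty, [])).2).reverse
    = specFrom [] lst
  rw [foldB_invariant lst.reverse [] _ []
    (by intro x; rw [PySem.Dict.getD_foldl_insert_add_one]; simp)]
  simp

-- ===== VERDICT (by name: the statement is the Claim_ definition above) =====
theorem replace_duplicates_with_suffixes_spec : Claim_equal_replace_duplicates_with_suffixes := by
  intro lst _
  show replace_duplicates_with_suffixes lst = replace_duplicates_with_suffixes_alt lst
  rw [portA_eq_specFrom, portB_eq_specFrom]
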